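-- pv_equiv track=rewrite | github.com/mtsprznto/auto_actualizar_cv | utils/utils.py | agrupar_lenguajes_por_categoria
-- ===== SOURCE A (Python) =====
-- def agrupar_lenguajes_por_categoria(lenguajes: list) -> dict:
--     frontend = {"HTML", "CSS", "TypeScript", "JavaScript", "Blade", "Vue", "Svelte"}
--     backend = {"PHP", "Java", "C#", "Go", "Ruby", "Rust", "Kotlin", "SQL"}
--     scripting = {"Python", "Shell", "Bash", "PowerShell", "R", "Perl"}
--
--     grupos = {"Frontend": [], "Backend": [], "Scripting": [], "Otros": []}
--
--     for lang in lenguajes: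
--         if lang in frontend:
--             grupos["Frontend"].append(lang)
--         elif lang in backend:
--             grupos["Backend"].append(lang)
--         elif lang in scripting:
--             grupos["Scripting"].append(lang)
--         else:
--             grupos["Otros"].append(lang)
--
--     # Ordenar alfabéticamente
--     return {k: sorted(set(v)) for k, v in grupos.items() if v}
-- ===== SOURCE B (Python) =====
-- def agrupar_lenguajes_por_categoria(lenguajes: list) -> dict:
--     frontend = {"HTML", "CSS", "TypeScript", "JavaScript", "Blade", "Vue", "Svelte"}
--     backend = {"PHP", "Java", "C#", "Go", "Ruby", "Rust", "Kotlin", "SQL"}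
--     scripting = {"Python", "Shell", "Bash", "PowerShell", "R", "Perl"}
--     conocidos = frontend | backend | scripting
--
--     # dedup and sort the whole input ONCE, then slice the sorted unique list per category
--     unicos = sorted(set(lenguajes))
--
--     resultado = {}
--     for nombre, conjunto in (("Frontend", frontend), ("Backend", backend),
--                              ("Scripting", scripting)):
--         grupo = [l for l in unicos if l in conjunto]
--         if grupo:
--             resultado[nombre] = grupo
--     otros = [l for l in unicos if l not in conocidos]
--     if otros:
--         resultado["Otros"] = otros
--     return resultado
-- ===== Notes on version B (the rewrite author's own statement) =====
-- stated objective: alternative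
-- what changed: Instead of A's single pass distributing each element into pre-seeded buckets and then sorting/deduplicating each bucket separately, B deduplicates and sorts the whole input once up front and then partitions that sorted unique list by filtering it per category (Otros = not in the union of the three sets).
import Mathlib
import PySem

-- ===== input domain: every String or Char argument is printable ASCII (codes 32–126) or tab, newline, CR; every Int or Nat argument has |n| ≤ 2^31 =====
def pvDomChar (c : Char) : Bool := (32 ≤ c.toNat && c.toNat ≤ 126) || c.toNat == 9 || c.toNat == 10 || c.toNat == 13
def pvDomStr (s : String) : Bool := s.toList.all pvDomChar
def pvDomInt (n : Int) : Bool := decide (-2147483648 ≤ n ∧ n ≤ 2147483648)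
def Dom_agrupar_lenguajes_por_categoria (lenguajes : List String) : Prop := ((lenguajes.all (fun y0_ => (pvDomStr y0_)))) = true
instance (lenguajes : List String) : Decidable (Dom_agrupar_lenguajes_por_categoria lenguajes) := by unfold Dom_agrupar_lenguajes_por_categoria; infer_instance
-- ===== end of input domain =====

-- B deduplicates and sorts the whole input once, then partitions that sorted unique
-- list by filtering it per category, instead of A's one-pass bucket distribution
-- followed by a per-group set+sort (alternative decomposition, same result).

-- ===== PORT A =====
def pvFrontend : PySem.Set String :=
  PySem.Set.ofList ["HTML", "CSS", "TypeScript", "JavaScript", "Blade", "Vue", "Svelte"]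
def pvBackend : PySem.Set String :=
  PySem.Set.ofList ["PHP", "Java", "C#", "Go", "Ruby", "Rust", "Kotlin", "SQL"]
def pvScripting : PySem.Set String :=
  PySem.Set.ofList ["Python", "Shell", "Bash", "PowerShell", "R", "Perl"]

def agrupar_lenguajes_por_categoria (lenguajes : List String) : List (String × List String) :=
  let grupos : PySem.Dict String (List String) :=
    PySem.Dict.ofList [("Frontend", []), ("Backend", []), ("Scripting", []), ("Otros", [])]
  let grupos := lenguajes.foldl (fun g lang =>
    if PySem.Set.contains pvFrontend lang then g.modify "Frontend" [] (· ++ [lang])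
    else if PySem.Set.contains pvBackend lang then g.modify "Backend" [] (· ++ [lang])
    else if PySem.Set.contains pvScripting lang then g.modify "Scripting" [] (· ++ [lang])
    else g.modify "Otros" [] (· ++ [lang])) grupos
  -- {k: sorted(set(v)) for k, v in grupos.items() if v}
  (grupos.items.filter (fun p => !p.2.isEmpty)).map
    (fun p => (p.1, PySem.List.sorted (PySem.Set.ofList p.2) (fun x => x) false))

-- ===== PORT B =====
-- B's own copies of the three category sets and their union (conocidos)
def pvBFrontend : PySem.Set String :=
  PySem.Set.ofList ["HTML", "CSS", "TypeScript", "JavaScript", "Blade", "Vue", "Svelte"]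
def pvBBackend : PySem.Set String :=
  PySem.Set.ofList ["PHP", "Java", "C#", "Go", "Ruby", "Rust", "Kotlin", "SQL"]
def pvBScripting : PySem.Set String :=
  PySem.Set.ofList ["Python", "Shell", "Bash", "PowerShell", "R", "Perl"]
def pvConocidos : PySem.Set String :=
  PySem.Set.union (PySem.Set.union pvBFrontend pvBBackend) pvBScripting

def agrupar_lenguajes_por_categoria_alt (lenguajes : List String) : List (String × List String) :=
  -- unicos = sorted(set(lenguajes)) : dedup + sort the whole input once
  let unicos := PySem.List.sorted (PySem.Set.ofList lenguajes) (fun x => x) false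
  -- for nombre, conjunto in (...): grupo = [l for l in unicos if l in conjunto]; if grupo: resultado[nombre] = grupo
  let resultado : PySem.Dict String (List String) :=
    [("Frontend", pvBFrontend), ("Backend", pvBBackend), ("Scripting", pvBScripting)].foldl
      (fun r p =>
        let grupo := unicos.filter (fun l => PySem.Set.contains p.2 l)
        if !grupo.isEmpty then r.insert p.1 grupo else r)
      PySem.Dict.empty
  -- otros = [l for l in unicos if l not in conocidos]; if otros: resultado["Otros"] = otros
  let otros := unicos.filter (fun l => !PySem.Set.contains pvConocidos l)
  (if !otros.isEmpty then resultado.insert "Otros" otros else resultado).items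

-- ===== PRECONDITION & SPEC =====
def Spec_agrupar_lenguajes_por_categoria (lenguajes : List String) (out : List (String × List String)) : Prop := out = agrupar_lenguajes_por_categoria_alt lenguajes
instance (lenguajes : List String) (out : List (String × List String)) : Decidable (Spec_agrupar_lenguajes_por_categoria lenguajes out) := by unfold Spec_agrupar_lenguajes_por_categoria; infer_instance

-- ===== CLAIM (what is proved, stated in full; the proofs are below) =====
def Claim_equal_agrupar_lenguajes_por_categoria : Prop := ∀ (lenguajes : List String), Dom_agrupar_lenguajes_por_categoria lenguajes → Spec_agrupar_lenguajes_por_categoria lenguajes (agrupar_lenguajes_por_categoria lenguajes)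

-- ===== LEMMAS AND PROOFS =====

-- the category A's if/elif chain assigns to a language
def pvCatOf (lang : String) : String :=
  if PySem.Set.contains pvFrontend lang then "Frontend"
  else if PySem.Set.contains pvBackend lang then "Backend"
  else if PySem.Set.contains pvScripting lang then "Scripting"
  else "Otros"

-- A's loop computes the four filters
theorem pvA_fold (l : List String) (a b c d : List String) :
    l.foldl (fun g lang =>
      if PySem.Set.contains pvFrontend lang then g.modify "Frontend" [] (· ++ [lang])
      else if PySem.Set.contains pvBackend lang then g.modify "Backend" [] (· ++ [lang])
      else if PySem.Set.contains pvScripting lang then g.modify "Scripting" [] (· ++ [lang])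
      else g.modify "Otros" [] (· ++ [lang]))
      (PySem.Dict.mk [("Frontend", a), ("Backend", b), ("Scripting", c), ("Otros", d)])
    = PySem.Dict.mk [("Frontend", a ++ l.filter (fun x => pvCatOf x == "Frontend")),
        ("Backend", b ++ l.filter (fun x => pvCatOf x == "Backend")),
        ("Scripting", c ++ l.filter (fun x => pvCatOf x == "Scripting")),
        ("Otros", d ++ l.filter (fun x => pvCatOf x == "Otros"))] := by
  induction l generalizing a b c d with
  | nil => simp
  | cons x t ih =>
    rw [List.foldl_cons]
    by_cases hf : x ∈ pvFrontend
    · have hf' : PySem.Set.contains pvFrontend x = true := by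
        simp [PySem.Set.contains, hf]
      have hcat : pvCatOf x = "Frontend" := by simp [pvCatOf, PySem.Set.contains, hf]
      rw [if_pos hf']
      rw [show (PySem.Dict.mk [("Frontend", a), ("Backend", b), ("Scripting", c), ("Otros", d)]).modify "Frontend" [] (· ++ [x])
          = PySem.Dict.mk [("Frontend", a ++ [x]), ("Backend", b), ("Scripting", c), ("Otros", d)] from rfl]
      rw [ih]
      simp [hcat]
    · have hf' : ¬ PySem.Set.contains pvFrontend x = true := by
        simp [PySem.Set.contains, hf]
      rw [if_neg hf']
      by_cases hb : x ∈ pvBackend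
      · have hb' : PySem.Set.contains pvBackend x = true := by
          simp [PySem.Set.contains, hb]
        have hcat : pvCatOf x = "Backend" := by simp [pvCatOf, PySem.Set.contains, hf, hb]
        rw [if_pos hb']
        rw [show (PySem.Dict.mk [("Frontend", a), ("Backend", b), ("Scripting", c), ("Otros", d)]).modify "Backend" [] (· ++ [x])
            = PySem.Dict.mk [("Frontend", a), ("Backend", b ++ [x]), ("Scripting", c), ("Otros", d)] from rfl]
        rw [ih]
        simp [hcat]
      · have hb' : ¬ PySem.Set.contains pvBackend x = true := by
          simp [PySem.Set.contains, hb]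
        rw [if_neg hb']
        by_cases hs : x ∈ pvScripting
        · have hs' : PySem.Set.contains pvScripting x = true := by
            simp [PySem.Set.contains, hs]
          have hcat : pvCatOf x = "Scripting" := by simp [pvCatOf, PySem.Set.contains, hf, hb, hs]
          rw [if_pos hs']
          rw [show (PySem.Dict.mk [("Frontend", a), ("Backend", b), ("Scripting", c), ("Otros", d)]).modify "Scripting" [] (· ++ [x])
              = PySem.Dict.mk [("Frontend", a), ("Backend", b), ("Scripting", c ++ [x]), ("Otros", d)] from rfl]
          rw [ih]
          simp [hcat]
        · have hs' : ¬ PySem.Set.contains pvScripting x = true := by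
            simp [PySem.Set.contains, hs]
          have hcat : pvCatOf x = "Otros" := by simp [pvCatOf, PySem.Set.contains, hf, hb, hs]
          rw [if_neg hs']
          rw [show (PySem.Dict.mk [("Frontend", a), ("Backend", b), ("Scripting", c), ("Otros", d)]).modify "Otros" [] (· ++ [x])
              = PySem.Dict.mk [("Frontend", a), ("Backend", b), ("Scripting", c), ("Otros", d ++ [x])] from rfl]
          rw [ih]
          simp [hcat]

-- B's membership tests agree with A's if/elif chain, category by category
theorem pv_contains_front (x : String) :
    PySem.Set.contains pvBFrontend x = (pvCatOf x == "Frontend") := by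
  unfold pvCatOf
  rw [show PySem.Set.contains pvBFrontend x = PySem.Set.contains pvFrontend x from rfl]
  by_cases hf : PySem.Set.contains pvFrontend x = true
  · rw [hf]; rfl
  · rw [eq_false_of_ne_true hf]
    simp only [Bool.false_eq_true, if_false]
    split_ifs <;> rfl

theorem pv_contains_back (x : String) :
    PySem.Set.contains pvBBackend x = (pvCatOf x == "Backend") := by
  unfold pvCatOf
  by_cases hf : x ∈ pvFrontend
  · have hf' : PySem.Set.contains pvFrontend x = true := by simp [PySem.Set.contains, hf]
    rw [if_pos hf']
    rw [show pvFrontend = (["HTML", "CSS", "TypeScript", "JavaScript", "Blade", "Vue", "Svelte"] : List String) from rfl] at hf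
    simp only [List.mem_cons, List.not_mem_nil, or_false] at hf
    rcases hf with rfl|rfl|rfl|rfl|rfl|rfl|rfl <;> decide
  · have hf' : ¬ PySem.Set.contains pvFrontend x = true := by simp [PySem.Set.contains, hf]
    rw [if_neg hf']
    rw [show PySem.Set.contains pvBBackend x = PySem.Set.contains pvBackend x from rfl]
    by_cases hb : PySem.Set.contains pvBackend x = true
    · rw [hb]; rfl
    · rw [eq_false_of_ne_true hb]
      simp only [Bool.false_eq_true, if_false]
      split_ifs <;> rfl

theorem pv_contains_script (x : String) :
    PySem.Set.contains pvBScripting x = (pvCatOf x == "Scripting") := by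
  unfold pvCatOf
  by_cases hf : x ∈ pvFrontend
  · have hf' : PySem.Set.contains pvFrontend x = true := by simp [PySem.Set.contains, hf]
    rw [if_pos hf']
    rw [show pvFrontend = (["HTML", "CSS", "TypeScript", "JavaScript", "Blade", "Vue", "Svelte"] : List String) from rfl] at hf
    simp only [List.mem_cons, List.not_mem_nil, or_false] at hf
    rcases hf with rfl|rfl|rfl|rfl|rfl|rfl|rfl <;> decide
  · have hf' : ¬ PySem.Set.contains pvFrontend x = true := by simp [PySem.Set.contains, hf]
    rw [if_neg hf']
    by_cases hb : x ∈ pvBackend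
    · have hb' : PySem.Set.contains pvBackend x = true := by simp [PySem.Set.contains, hb]
      rw [if_pos hb']
      rw [show pvBackend = (["PHP", "Java", "C#", "Go", "Ruby", "Rust", "Kotlin", "SQL"] : List String) from rfl] at hb
      simp only [List.mem_cons, List.not_mem_nil, or_false] at hb
      rcases hb with rfl|rfl|rfl|rfl|rfl|rfl|rfl|rfl <;> decide
    · have hb' : ¬ PySem.Set.contains pvBackend x = true := by simp [PySem.Set.contains, hb]
      rw [if_neg hb']
      rw [show PySem.Set.contains pvBScripting x = PySem.Set.contains pvScripting x from rfl]
      by_cases hs : PySem.Set.contains pvScripting x = true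
      · rw [hs]; rfl
      · rw [eq_false_of_ne_true hs]
        simp only [Bool.false_eq_true, if_false]
        rfl

theorem pv_conocidos (x : String) :
    PySem.Set.contains pvConocidos x
      = (PySem.Set.contains pvBFrontend x || PySem.Set.contains pvBBackend x ||
         PySem.Set.contains pvBScripting x) := by
  rw [show pvConocidos = (["HTML", "CSS", "TypeScript", "JavaScript", "Blade", "Vue", "Svelte",
       "PHP", "Java", "C#", "Go", "Ruby", "Rust", "Kotlin", "SQL",
       "Python", "Shell", "Bash", "PowerShell", "R", "Perl"] : List String) from rfl]
  simp [PySem.Set.contains, pvBFrontend, pvBBackend, pvBScripting, PySem.Set.ofList]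
  simp only [Bool.or_assoc]

theorem pv_contains_otros (x : String) :
    (!PySem.Set.contains pvConocidos x) = (pvCatOf x == "Otros") := by
  rw [pv_conocidos]
  rw [show PySem.Set.contains pvBFrontend x = PySem.Set.contains pvFrontend x from rfl,
      show PySem.Set.contains pvBBackend x = PySem.Set.contains pvBackend x from rfl,
      show PySem.Set.contains pvBScripting x = PySem.Set.contains pvScripting x from rfl]
  unfold pvCatOf
  by_cases h1 : PySem.Set.contains pvFrontend x = true
  · rw [h1]; rfl
  · rw [eq_false_of_ne_true h1]
    simp only [Bool.false_eq_true, if_false, Bool.false_or]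
    by_cases h2 : PySem.Set.contains pvBackend x = true
    · rw [h2]; rfl
    · rw [eq_false_of_ne_true h2]
      simp only [Bool.false_eq_true, if_false, Bool.false_or]
      by_cases h3 : PySem.Set.contains pvScripting x = true
      · rw [h3]; rfl
      · rw [eq_false_of_ne_true h3]; rfl

-- sorted(set(·)) commutes with filtering: filtering the globally sorted unique list
-- per category yields the per-category sorted unique list A computes
theorem pv_sorted_filter (p : String → Bool) (l : List String) :
    (PySem.List.sorted (PySem.Set.ofList l) (fun x => x) false).filter p
      = PySem.List.sorted (PySem.Set.ofList (l.filter p)) (fun x => x) false := by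
  symm
  apply PySem.List.sorted_id_eq_of_perm_of_pairwise
  · -- Perm: both are nodup with the same membership
    rw [List.perm_ext_iff_of_nodup]
    · intro a
      simp [PySem.List.mem_sorted, PySem.Set.mem_ofList, List.mem_filter]
    · exact ((PySem.List.sorted_perm _ _ _).nodup_iff).mpr (PySem.Set.nodup_ofList l) |>.filter p
    · exact PySem.Set.nodup_ofList _
  · exact ((PySem.List.sorted_ofList_pairwise_lt (xs := l)).filter p).imp (fun h => le_of_lt h)

-- the emptiness tests on both sides are `any` of the same filter
theorem pv_not_isEmpty_filter (p : String → Bool) (l : List String) :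
    (!(l.filter p).isEmpty) = l.any p := by
  induction l with
  | nil => simp
  | cons x t ih => by_cases h : p x <;> simp [h, ih]

theorem pv_ofList_eq_nil_iff (l : List String) : PySem.Set.ofList l = [] ↔ l = [] := by
  constructor
  · intro h
    rw [List.eq_nil_iff_forall_not_mem]
    intro x hx
    have : x ∈ PySem.Set.ofList l := (PySem.Set.mem_ofList _ _).mpr hx
    simp [h] at this
  · rintro rfl; rfl

theorem pv_sorted_ofList_isEmpty (l : List String) :
    (PySem.List.sorted (PySem.Set.ofList l) (fun x => x) false).isEmpty = l.isEmpty := by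
  rcases eq_or_ne l [] with rfl | h
  · rfl
  · have h2 : PySem.List.sorted (PySem.Set.ofList l) (fun x => x) false ≠ [] := by
      intro hh
      exact h ((pv_ofList_eq_nil_iff l).mp ((PySem.List.sorted_eq_nil_iff _ _ _).mp hh))
    have e1 : (PySem.List.sorted (PySem.Set.ofList l) (fun x => x) false).isEmpty = false := by
      simpa using h2
    have e2 : l.isEmpty = false := by simpa using h
    rw [e1, e2]

-- ===== VERDICT (by name: the statement is the Claim_ definition above) =====
theorem agrupar_lenguajes_por_categoria_spec : Claim_equal_agrupar_lenguajes_por_categoria := by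
  intro l _
  unfold Spec_agrupar_lenguajes_por_categoria
  simp only [agrupar_lenguajes_por_categoria, agrupar_lenguajes_por_categoria_alt]
  rw [show PySem.Dict.ofList [("Frontend", ([] : List String)), ("Backend", []), ("Scripting", []), ("Otros", [])]
      = PySem.Dict.mk [("Frontend", []), ("Backend", []), ("Scripting", []), ("Otros", [])] from rfl]
  rw [pvA_fold l [] [] [] []]
  simp only [List.foldl_cons, List.foldl_nil]
  simp only [fun x => pv_contains_front x, fun x => pv_contains_back x,
    fun x => pv_contains_script x, fun x => pv_contains_otros x]
  simp only [pv_sorted_filter]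
  simp only [pv_sorted_ofList_isEmpty, List.nil_append]
  simp only [pv_not_isEmpty_filter]
  by_cases e1 : l.any (fun x => pvCatOf x == "Frontend") <;>
    by_cases e2 : l.any (fun x => pvCatOf x == "Backend") <;>
      by_cases e3 : l.any (fun x => pvCatOf x == "Scripting") <;>
        by_cases e4 : l.any (fun x => pvCatOf x == "Otros") <;>
          simp [e1, e2, e3, e4, pv_not_isEmpty_filter, PySem.Dict.insert, PySem.Dict.empty,
            PySem.Dict.contains, List.filter]
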